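-- pv_equiv track=rewrite | github.com/wildmeshing/wildmeshing-toolkit | tests/auto_generated/delete_triangles.py | is_mesh_vertex_manifold
-- ===== SOURCE A (Python) =====
-- def check_vertex_manifold(vertex, faces, vertex_to_faces):
--     connected_faces = vertex_to_faces[vertex]
--     visited_faces = set()
--     if (len(connected_faces) == 0):
--         return True
--     stack = [next(iter(connected_faces))]
--
--     while stack:
--         current_face = stack.pop()
--         visited_faces.add(current_face)
--
--         for idx in faces[current_face]:
--             if idx != vertex:
--                 neighbor_faces = vertex_to_faces[idx] & vertex_to_faces[vertex] - visited_faces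
--                 stack.extend(neighbor_faces)
--
--     return visited_faces == connected_faces
--
-- def is_mesh_vertex_manifold(faces, vertex_to_check = None):
--     from collections import defaultdict
--
--     vertex_to_faces = defaultdict(set)
--     for i, face in enumerate(faces):
--         for vertex in face:
--             vertex_to_faces[vertex].add(i)
--
--     if vertex_to_check is None:
--         vertex_to_check = vertex_to_faces.keys()
--
--     for vertex in vertex_to_check:
--         if (not check_vertex_manifold(vertex, faces, vertex_to_faces)):
--             return False
--
--     return True
-- ===== SOURCE B (Python) =====
-- def _fan_connected(v, faces, v2f):
--     # incident faces of v form one component under "share another vertex"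
--     inc = v2f.get(v, set())
--     if not inc:
--         return True
--     comp = {min(inc)}
--     for _ in range(len(inc)):
--         comp = comp | {g for f in comp for u in faces[f] if u != v
--                          for g in (v2f[u] & inc)}
--     return comp == inc
--
-- def is_mesh_vertex_manifold(faces, vertex_to_check=None):
--     v2f = {}
--     for i, face in enumerate(faces):
--         for v in face:
--             v2f.setdefault(v, set()).add(i)
--     vertices = v2f.keys() if vertex_to_check is None else vertex_to_check
--     return all(_fan_connected(v, faces, v2f) for v in vertices)
-- ===== Notes on version B (the rewrite author's own statement) =====
-- stated objective: alternative
-- what changed: Per-vertex connectivity is computed by a bounded fixed-point iteration (len(incident) rounds of unioning the neighbour set of the current component) instead of A's explicit stack worklist with pop/extend and a visited set; the incidence map is a plain dict built with setdefault instead of a defaultdict.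
import Mathlib
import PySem

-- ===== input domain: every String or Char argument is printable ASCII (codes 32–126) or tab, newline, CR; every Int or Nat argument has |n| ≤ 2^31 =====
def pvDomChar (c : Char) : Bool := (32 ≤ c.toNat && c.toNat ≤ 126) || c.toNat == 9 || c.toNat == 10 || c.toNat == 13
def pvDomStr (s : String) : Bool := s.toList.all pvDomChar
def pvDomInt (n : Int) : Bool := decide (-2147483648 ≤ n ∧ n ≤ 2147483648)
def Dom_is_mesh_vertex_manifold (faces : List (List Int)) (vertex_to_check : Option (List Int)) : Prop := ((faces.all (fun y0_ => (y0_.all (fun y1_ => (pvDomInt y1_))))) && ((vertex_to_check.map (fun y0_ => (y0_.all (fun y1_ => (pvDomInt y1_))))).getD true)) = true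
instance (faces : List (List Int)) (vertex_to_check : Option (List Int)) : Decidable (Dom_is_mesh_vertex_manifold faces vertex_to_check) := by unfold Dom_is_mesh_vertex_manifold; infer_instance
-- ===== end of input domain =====

-- B replaces A's explicit DFS stack worklist by a bounded fixed-point iteration of the
-- neighbour-expansion map (objective: alternative; same cost, no speed claim).

-- ===== PORT A =====
-- vertex_to_faces: defaultdict(set); built with d[vertex].add(i) (= modify with default empty set)
def pvV2FA (faces : List (List Int)) : PySem.Dict Int (PySem.Set Int) :=
  (faces.foldl
    (fun (acc : Int × PySem.Dict Int (PySem.Set Int)) face =>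
      (acc.1 + 1,
       face.foldl (fun d u => d.modify u PySem.Set.empty (fun s => s.add acc.1)) acc.2))
    (0, PySem.Dict.empty)).2

-- for idx in faces[current_face]: if idx != vertex: collect vertex_to_faces[idx] & (vertex_to_faces[vertex] - visited)
-- (the lists pushed on the stack; Python iterates the sets in hash order, which PySem does not model —
-- the stack order only affects internal traversal order, never the returned value, as proved below)
def pvNbrsA (faces : List (List Int)) (v2f : PySem.Dict Int (PySem.Set Int)) (v : Int)
    (vis : PySem.Set Int) (f : Int) : List Int :=
  (PySem.List.pyGetD faces f []).foldl
    (fun acc idx =>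
      if idx ≠ v then
        acc ++ PySem.Set.inter (v2f.getD idx PySem.Set.empty)
            (PySem.Set.diff (v2f.getD v PySem.Set.empty) vis)
      else acc) []

-- the while-stack loop of check_vertex_manifold; the Nat argument is a totalizing fuel guard only:
-- the loop is proved below to finish within pvFuelA steps, so the fuel branch is never taken
def pvDfsA (faces : List (List Int)) (v2f : PySem.Dict Int (PySem.Set Int)) (v : Int) :
    Nat → List Int → PySem.Set Int → PySem.Set Int
  | 0, _, vis => vis
  | _ + 1, [], vis => vis
  | n + 1, f :: rest, vis =>
    pvDfsA faces v2f v n (pvNbrsA faces v2f v (PySem.Set.add vis f) f ++ rest)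
      (PySem.Set.add vis f)

def pvLmaxA (faces : List (List Int)) : Nat := (faces.map List.length).foldl max 0
def pvVmaxA (v2f : PySem.Dict Int (PySem.Set Int)) : Nat := (v2f.values.map List.length).foldl max 0
def pvFuelA (faces : List (List Int)) (v2f : PySem.Dict Int (PySem.Set Int)) (conn : PySem.Set Int) : Nat :=
  2 + (pvLmaxA faces * pvVmaxA v2f + 1) * conn.length

-- check_vertex_manifold (the start face next(iter(connected_faces)) is taken as the first stored element;
-- set iteration order is not modelled by PySem and the returned value is independent of the choice)
def pvCheckA (faces : List (List Int)) (v2f : PySem.Dict Int (PySem.Set Int)) (v : Int) : Bool :=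
  match v2f.getD v PySem.Set.empty with
  | [] => true
  | s :: t =>
      PySem.Set.equal
        (pvDfsA faces v2f v (pvFuelA faces v2f (s :: t)) [s] PySem.Set.empty)
        (s :: t)

def is_mesh_vertex_manifold (faces : List (List Int)) (vertex_to_check : Option (List Int)) : Bool :=
  let v2f := pvV2FA faces
  (match vertex_to_check with
   | none => v2f.keys
   | some l => l).all (fun u => pvCheckA faces v2f u)

-- ===== PORT B =====
-- plain dict built with setdefault(v, set()).add(i)
def pvV2FB (faces : List (List Int)) : PySem.Dict Int (PySem.Set Int) :=
  (faces.foldl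
    (fun (acc : Int × PySem.Dict Int (PySem.Set Int)) face =>
      (acc.1 + 1,
       face.foldl (fun d u => d.insert u ((d.getD u PySem.Set.empty).add acc.1)) acc.2))
    (0, PySem.Dict.empty)).2

-- {g for f in comp for u in faces[f] if u != v for g in v2f[u] & inc}, gathered as a list
-- (set/dict iteration order is not modelled; the value of the final set-equality test is order-independent)
def pvGatherB (faces : List (List Int)) (v2f : PySem.Dict Int (PySem.Set Int)) (v : Int)
    (inc : PySem.Set Int) (comp : PySem.Set Int) : List Int :=
  comp.foldl
    (fun acc f =>
      (PySem.List.pyGetD faces f []).foldl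
        (fun acc2 u =>
          if u ≠ v then acc2 ++ PySem.Set.inter (v2f.getD u PySem.Set.empty) inc else acc2)
        acc)
    []

-- comp | {…}
def pvExpandB (faces : List (List Int)) (v2f : PySem.Dict Int (PySem.Set Int)) (v : Int)
    (inc : PySem.Set Int) (comp : PySem.Set Int) : PySem.Set Int :=
  PySem.Set.union comp (pvGatherB faces v2f v inc comp)

def pvCheckB (faces : List (List Int)) (v2f : PySem.Dict Int (PySem.Set Int)) (v : Int) : Bool :=
  let inc := v2f.getD v PySem.Set.empty
  if inc.isEmpty then true
  else
    match PySem.List.min? inc (fun x => x) with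
    | none => true    -- unreachable: inc is nonempty here
    | some s =>
        PySem.Set.equal
          ((List.range inc.length).foldl (fun c _ => pvExpandB faces v2f v inc c)
            (PySem.Set.add PySem.Set.empty s))
          inc

def is_mesh_vertex_manifold_alt (faces : List (List Int)) (vertex_to_check : Option (List Int)) : Bool :=
  let v2f := pvV2FB faces
  (match vertex_to_check with
   | none => v2f.keys
   | some l => l).all (fun u => pvCheckB faces v2f u)

-- ===== PRECONDITION & SPEC =====
def Spec_is_mesh_vertex_manifold (faces : List (List Int)) (vertex_to_check : Option (List Int)) (out : Bool) : Prop := out = is_mesh_vertex_manifold_alt faces vertex_to_check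
instance (faces : List (List Int)) (vertex_to_check : Option (List Int)) (out : Bool) : Decidable (Spec_is_mesh_vertex_manifold faces vertex_to_check out) := by unfold Spec_is_mesh_vertex_manifold; infer_instance

-- ===== CLAIM (what is proved, stated in full; the proofs are below) =====
def Claim_equal_is_mesh_vertex_manifold : Prop := ∀ (faces : List (List Int)) (vertex_to_check : Option (List Int)), Dom_is_mesh_vertex_manifold faces vertex_to_check → Spec_is_mesh_vertex_manifold faces vertex_to_check (is_mesh_vertex_manifold faces vertex_to_check)

-- ===== LEMMAS AND PROOFS =====

-- the two incidence maps are the same dictionary (modify = insert of the defaulted get)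
lemma pvBuild_eq (faces : List (List Int)) : pvV2FA faces = pvV2FB faces := rfl

-- adjacency between two incident faces of v: they share some vertex u ≠ v
def pvAdj (faces : List (List Int)) (v2f : PySem.Dict Int (PySem.Set Int)) (v : Int)
    (f x : Int) : Prop :=
  ∃ u ∈ PySem.List.pyGetD faces f [], u ≠ v ∧
    x ∈ v2f.getD u PySem.Set.empty ∧ x ∈ v2f.getD v PySem.Set.empty

def pvReach (faces : List (List Int)) (v2f : PySem.Dict Int (PySem.Set Int)) (v : Int) :
    Int → Int → Prop :=
  Relation.ReflTransGen (pvAdj faces v2f v)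

lemma pv_mem_nbrsA (faces : List (List Int)) (v2f : PySem.Dict Int (PySem.Set Int)) (v : Int)
    (vis : PySem.Set Int) (f x : Int) :
    x ∈ pvNbrsA faces v2f v vis f ↔ pvAdj faces v2f v f x ∧ x ∉ vis := by
  unfold pvNbrsA
  rw [show (fun (acc : List Int) idx =>
        if idx ≠ v then
          acc ++ PySem.Set.inter (v2f.getD idx PySem.Set.empty)
              (PySem.Set.diff (v2f.getD v PySem.Set.empty) vis)
        else acc)
      = (fun (acc : List Int) idx => acc ++
          if idx ≠ v then
            PySem.Set.inter (v2f.getD idx PySem.Set.empty)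
                (PySem.Set.diff (v2f.getD v PySem.Set.empty) vis)
          else []) from funext fun acc => funext fun idx => by
        by_cases h : idx = v <;> simp [h]]
  rw [PySem.List.foldl_append_eq_flatMap]
  simp only [List.nil_append, List.mem_flatMap, pvAdj]
  constructor
  · rintro ⟨u, hu, hx⟩
    by_cases h : u = v
    · simp [h] at hx
    · simp only [h, ne_eq, not_false_iff, if_true] at hx
      rw [PySem.Set.mem_inter] at hx
      rcases hx with ⟨h1, h2⟩
      rw [PySem.Set.mem_diff] at h2
      exact ⟨⟨u, hu, h, h1, h2.1⟩, h2.2⟩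
  · rintro ⟨⟨u, hu, hne, h1, h2⟩, hv⟩
    refine ⟨u, hu, ?_⟩
    simp only [hne, ne_eq, not_false_iff, if_true]
    rw [PySem.Set.mem_inter, PySem.Set.mem_diff]
    exact ⟨h1, h2, hv⟩

lemma pv_nbrsA_len (faces : List (List Int)) (v2f : PySem.Dict Int (PySem.Set Int)) (v : Int)
    (vis : PySem.Set Int) (f : Int) :
    (pvNbrsA faces v2f v vis f).length ≤ pvLmaxA faces * pvVmaxA v2f := by
  have hgetD : ∀ u : Int, (v2f.getD u PySem.Set.empty).length ≤ pvVmaxA v2f := by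
    intro u
    unfold PySem.Dict.getD PySem.Dict.get?
    cases hf : List.find? (fun p => p.1 == u) v2f.items with
    | none => simp [PySem.Set.empty]
    | some p =>
        simp only [Option.map_some, Option.getD_some]
        have hm : p.2.length ∈ (v2f.values.map List.length) := by
          simp only [PySem.Dict.values]
          exact List.mem_map_of_mem (List.mem_map_of_mem (List.mem_of_find?_eq_some hf))
        exact ((PySem.List.le_foldl_max (v2f.values.map List.length) 0).2 _ hm)
  have hface : (PySem.List.pyGetD faces f []).length ≤ pvLmaxA faces := by
    unfold PySem.List.pyGetD
    cases hf : PySem.List.pyGet? faces f with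
    | none => simp
    | some l =>
        simp only [Option.getD_some]
        have hm : l.length ∈ faces.map List.length :=
          List.mem_map_of_mem (PySem.List.mem_of_pyGet?_eq_some faces hf)
        exact ((PySem.List.le_foldl_max (faces.map List.length) 0).2 _ hm)
  unfold pvNbrsA
  rw [show (fun (acc : List Int) idx =>
        if idx ≠ v then
          acc ++ PySem.Set.inter (v2f.getD idx PySem.Set.empty)
              (PySem.Set.diff (v2f.getD v PySem.Set.empty) vis)
        else acc)
      = (fun (acc : List Int) idx => acc ++
          if idx ≠ v then
            PySem.Set.inter (v2f.getD idx PySem.Set.empty)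
                (PySem.Set.diff (v2f.getD v PySem.Set.empty) vis)
          else []) from funext fun acc => funext fun idx => by
        by_cases h : idx = v <;> simp [h]]
  rw [PySem.List.foldl_append_eq_flatMap]
  simp only [List.nil_append, List.length_flatMap]
  calc (List.map (fun u => (if u ≠ v then
            PySem.Set.inter (v2f.getD u PySem.Set.empty)
                (PySem.Set.diff (v2f.getD v PySem.Set.empty) vis)
          else []).length) (PySem.List.pyGetD faces f [])).sum
      ≤ (List.map (fun u => (if u ≠ v then
            PySem.Set.inter (v2f.getD u PySem.Set.empty)
                (PySem.Set.diff (v2f.getD v PySem.Set.empty) vis)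
          else []).length) (PySem.List.pyGetD faces f [])).length • (pvVmaxA v2f) := by
        apply List.sum_le_card_nsmul
        intro x hx
        rcases List.mem_map.1 hx with ⟨u, hu, rfl⟩
        by_cases h : u = v
        · simp [h]
        · simp only [h, ne_eq, not_false_iff, if_true]
          calc (PySem.Set.inter (v2f.getD u PySem.Set.empty)
                  (PySem.Set.diff (v2f.getD v PySem.Set.empty) vis)).length
              ≤ (v2f.getD u PySem.Set.empty).length := List.length_filter_le _ _
            _ ≤ pvVmaxA v2f := hgetD u
    _ ≤ pvLmaxA faces * pvVmaxA v2f := by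
        rw [List.length_map, smul_eq_mul]
        exact Nat.mul_le_mul_right _ hface

-- positional invariant: a visited stack entry has all its still-unvisited neighbours strictly above it
def pvInvPos (faces : List (List Int)) (v2f : PySem.Dict Int (PySem.Set Int)) (v : Int)
    (stack : List Int) (vis : PySem.Set Int) : Prop :=
  ∀ (i : Nat) (h : i < stack.length), stack[i] ∈ vis →
    ∀ x, pvAdj faces v2f v stack[i] x → x ∉ vis → x ∈ stack.take i

-- weak invariant: every unvisited neighbour of a visited face is somewhere on the stack
def pvInvW (faces : List (List Int)) (v2f : PySem.Dict Int (PySem.Set Int)) (v : Int)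
    (stack : List Int) (vis : PySem.Set Int) : Prop :=
  ∀ g ∈ vis, ∀ x, pvAdj faces v2f v g x → x ∉ vis → x ∈ stack

lemma pv_reach_closure (faces : List (List Int)) (v2f : PySem.Dict Int (PySem.Set Int)) (v : Int)
    (stack : List Int) (vis : PySem.Set Int) (hW : pvInvW faces v2f v stack vis) :
    ∀ g x, g ∈ vis → pvReach faces v2f v g x →
      x ∈ vis ∨ ∃ t ∈ stack, pvReach faces v2f v t x := by
  intro g x hg hreach
  unfold pvReach at hreach
  induction hreach using Relation.ReflTransGen.head_induction_on with
  | refl => exact Or.inl hg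
  | head h' hr ih =>
      rename_i a c
      by_cases hc : c ∈ vis
      · exact ih hc
      · exact Or.inr ⟨c, hW a hg c h' hc, hr⟩

lemma pv_countP_strict {α : Type} (l : List α) (p q : α → Bool)
    (himp : ∀ a ∈ l, p a = true → q a = true) (x : α) (hx : x ∈ l)
    (hq : q x = true) (hp : p x = false) : l.countP p < l.countP q := by
  induction l with
  | nil => cases hx
  | cons a t ih =>
      rw [List.countP_cons, List.countP_cons]
      rcases List.mem_cons.1 hx with rfl | hxt
      · have hmono : t.countP p ≤ t.countP q :=
          List.countP_mono_left (fun a ha => himp a (List.mem_cons_of_mem _ ha))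
        have h0 : (if p x = true then 1 else 0) = 0 := by simp [hp]
        have h1 : (if q x = true then 1 else 0) = 1 := by simp [hq]
        rw [h0, h1]
        omega
      · have hlt : t.countP p < t.countP q :=
          ih (fun a ha => himp a (List.mem_cons_of_mem _ ha)) hxt
        have hhead : (if p a then 1 else 0) ≤ (if q a then 1 else 0) := by
          by_cases h : p a = true
          · simp [h, himp a (List.mem_cons_self) h]
          · simp only [Bool.not_eq_true] at h
            simp [h]
        split_ifs at hhead ⊢ <;> omega

def pvUnvis (v2f : PySem.Dict Int (PySem.Set Int)) (v : Int) (vis : PySem.Set Int) : Nat :=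
  (v2f.getD v PySem.Set.empty).countP (fun x => !(PySem.Set.contains vis x))

lemma pv_dfsA_mem (faces : List (List Int)) (v2f : PySem.Dict Int (PySem.Set Int)) (v : Int) :
    ∀ (n : Nat) (stack : List Int) (vis : PySem.Set Int),
      pvInvPos faces v2f v stack vis → pvInvW faces v2f v stack vis →
      (∀ t ∈ stack, t ∈ v2f.getD v PySem.Set.empty) →
      stack.length + (pvLmaxA faces * pvVmaxA v2f + 1) * pvUnvis v2f v vis ≤ n →
      ∀ x, x ∈ pvDfsA faces v2f v n stack vis ↔
        (x ∈ vis ∨ ∃ t ∈ stack, pvReach faces v2f v t x) := by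
  intro n
  induction n with
  | zero =>
      intro stack vis hPos hW hsub hfuel x
      have hstack : stack = [] := by
        cases stack with
        | nil => rfl
        | cons f r =>
            exfalso
            generalize (pvLmaxA faces * pvVmaxA v2f + 1) * pvUnvis v2f v vis = m at hfuel
            simp only [List.length_cons] at hfuel
            omega
      subst hstack
      simp [pvDfsA]
  | succ n ih =>
      intro stack vis hPos hW hsub hfuel x
      cases stack with
      | nil => simp [pvDfsA]
      | cons f rest =>
        by_cases hf : f ∈ vis
        · -- the popped face is already visited: by the positional invariant it pushes nothing
          have hcontains : PySem.Set.contains vis f = true := (PySem.Set.contains_iff vis f).2 hf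
          have hvis' : PySem.Set.add vis f = vis := by
            unfold PySem.Set.add; rw [if_pos hcontains]
          have hps : pvNbrsA faces v2f v (PySem.Set.add vis f) f = [] := by
            rw [hvis']
            refine List.eq_nil_iff_forall_not_mem.2 (fun y hy => ?_)
            rw [pv_mem_nbrsA] at hy
            have h0 := hPos 0 (by simp) (by simpa using hf) y (by simpa using hy.1) hy.2
            simp at h0
          have hstep : pvDfsA faces v2f v (n+1) (f :: rest) vis
              = pvDfsA faces v2f v n rest vis := by
            show pvDfsA faces v2f v n
                (pvNbrsA faces v2f v (PySem.Set.add vis f) f ++ rest) (PySem.Set.add vis f)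
              = pvDfsA faces v2f v n rest vis
            rw [hps, hvis', List.nil_append]
          have hPos' : pvInvPos faces v2f v rest vis := by
            intro i hi hvisi x' hadj hnx
            have h2 := hPos (i+1) (by simpa using Nat.succ_lt_succ hi)
              (by simpa using hvisi) x' (by simpa using hadj) hnx
            simp only [List.take_succ_cons] at h2
            rcases List.mem_cons.1 h2 with rfl | h3
            · exact absurd hf hnx
            · exact h3
          have hW' : pvInvW faces v2f v rest vis := by
            intro g hg x' hadj hnx
            rcases List.mem_cons.1 (hW g hg x' hadj hnx) with rfl | h3
            · exact absurd hf hnx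
            · exact h3
          have hsub' : ∀ t ∈ rest, t ∈ v2f.getD v PySem.Set.empty :=
            fun t ht => hsub t (List.mem_cons_of_mem _ ht)
          have hfuel' : rest.length +
              (pvLmaxA faces * pvVmaxA v2f + 1) * pvUnvis v2f v vis ≤ n := by
            generalize (pvLmaxA faces * pvVmaxA v2f + 1) * pvUnvis v2f v vis = m at hfuel ⊢
            simp only [List.length_cons] at hfuel
            omega
          rw [hstep, ih rest vis hPos' hW' hsub' hfuel' x]
          constructor
          · rintro (h | ⟨t, ht, hr⟩)
            · exact Or.inl h
            · exact Or.inr ⟨t, List.mem_cons_of_mem _ ht, hr⟩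
          · rintro (h | ⟨t, ht, hr⟩)
            · exact Or.inl h
            · rcases List.mem_cons.1 ht with rfl | ht'
              · rcases pv_reach_closure faces v2f v rest vis hW' t x hf hr with h | h
                · exact Or.inl h
                · exact Or.inr h
              · exact Or.inr ⟨t, ht', hr⟩
        · -- the popped face is new: it is marked visited and its unvisited neighbours are pushed
          have hcontains : ¬ PySem.Set.contains vis f = true :=
            fun hc => hf ((PySem.Set.contains_iff vis f).1 hc)
          have hvis' : PySem.Set.add vis f = vis ++ [f] := by
            unfold PySem.Set.add; rw [if_neg hcontains]
          have hmemvis' : ∀ y, y ∈ PySem.Set.add vis f ↔ y ∈ vis ∨ y = f :=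
            fun y => PySem.Set.mem_add vis f y
          have hmps : ∀ y, y ∈ pvNbrsA faces v2f v (PySem.Set.add vis f) f ↔
              pvAdj faces v2f v f y ∧ y ∉ PySem.Set.add vis f :=
            fun y => pv_mem_nbrsA faces v2f v (PySem.Set.add vis f) f y
          have hfvis' : f ∈ PySem.Set.add vis f := (hmemvis' f).2 (Or.inr rfl)
          have hPos'' : pvInvPos faces v2f v
              (pvNbrsA faces v2f v (PySem.Set.add vis f) f ++ rest) (PySem.Set.add vis f) := by
            intro i hi hvisi x' hadj hnx
            by_cases hcase : i < (pvNbrsA faces v2f v (PySem.Set.add vis f) f).length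
            · exfalso
              have hmem : (pvNbrsA faces v2f v (PySem.Set.add vis f) f ++ rest)[i]
                  ∈ pvNbrsA faces v2f v (PySem.Set.add vis f) f := by
                rw [List.getElem_append_left hcase]
                exact List.getElem_mem _
              exact ((hmps _).1 hmem).2 hvisi
            · rw [Nat.not_lt] at hcase
              have hj : i - (pvNbrsA faces v2f v (PySem.Set.add vis f) f).length < rest.length := by
                rw [List.length_append] at hi
                omega
              have helem : (pvNbrsA faces v2f v (PySem.Set.add vis f) f ++ rest)[i]
                  = rest[i - (pvNbrsA faces v2f v (PySem.Set.add vis f) f).length] :=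
                List.getElem_append_right hcase
              have htake : (pvNbrsA faces v2f v (PySem.Set.add vis f) f ++ rest).take i
                  = pvNbrsA faces v2f v (PySem.Set.add vis f) f ++
                    rest.take (i - (pvNbrsA faces v2f v (PySem.Set.add vis f) f).length) := by
                rw [List.take_append, List.take_of_length_le hcase]
              rw [htake]
              have hnx' : x' ∉ vis := fun hxv => hnx ((hmemvis' x').2 (Or.inl hxv))
              rw [helem] at hvisi hadj
              by_cases hgv : rest[i - (pvNbrsA faces v2f v (PySem.Set.add vis f) f).length] ∈ vis
              · have h2 := hPos (i - (pvNbrsA faces v2f v (PySem.Set.add vis f) f).length + 1)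
                  (by simpa using Nat.succ_lt_succ hj) (by simpa using hgv) x'
                  (by simpa using hadj) hnx'
                simp only [List.take_succ_cons] at h2
                rcases List.mem_cons.1 h2 with rfl | h3
                · exact absurd hfvis' hnx
                · exact List.mem_append_right _ h3
              · have hgf : rest[i - (pvNbrsA faces v2f v (PySem.Set.add vis f) f).length] = f := by
                  rcases (hmemvis' _).1 hvisi with h | h
                  · exact absurd h hgv
                  · exact h
                rw [hgf] at hadj
                exact List.mem_append_left _ ((hmps x').2 ⟨hadj, hnx⟩)
          have hW'' : pvInvW faces v2f v
              (pvNbrsA faces v2f v (PySem.Set.add vis f) f ++ rest) (PySem.Set.add vis f) := by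
            intro g hg x' hadj hnx
            have hnx' : x' ∉ vis := fun hxv => hnx ((hmemvis' x').2 (Or.inl hxv))
            rcases (hmemvis' g).1 hg with hgv | rfl
            · rcases List.mem_cons.1 (hW g hgv x' hadj hnx') with rfl | h3
              · exact absurd hfvis' hnx
              · exact List.mem_append_right _ h3
            · exact List.mem_append_left _ ((hmps x').2 ⟨hadj, hnx⟩)
          have hsub'' : ∀ t ∈ pvNbrsA faces v2f v (PySem.Set.add vis f) f ++ rest,
              t ∈ v2f.getD v PySem.Set.empty := by
            intro t ht
            rcases List.mem_append.1 ht with hp | hrest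
            · rcases ((hmps t).1 hp).1 with ⟨u, _, _, _, h2⟩
              exact h2
            · exact hsub t (List.mem_cons_of_mem _ hrest)
          have hfuel'' : (pvNbrsA faces v2f v (PySem.Set.add vis f) f ++ rest).length +
              (pvLmaxA faces * pvVmaxA v2f + 1) * pvUnvis v2f v (PySem.Set.add vis f) ≤ n := by
            have hK := pv_nbrsA_len faces v2f v (PySem.Set.add vis f) f
            have hu' : pvUnvis v2f v (PySem.Set.add vis f) < pvUnvis v2f v vis := by
              refine pv_countP_strict _ _ _ (fun a _ hpa => ?_) f
                (hsub f List.mem_cons_self) (by simp [hf])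
                (by simp [hfvis'])
              by_cases hca : vis.contains a = true
              · exfalso
                have hconta : (PySem.Set.add vis f).contains a = true :=
                  (PySem.Set.contains_iff _ _).2
                    ((hmemvis' a).2 (Or.inl ((PySem.Set.contains_iff vis a).1 hca)))
                rw [hconta] at hpa
                exact absurd hpa (by simp)
              · have ha : a ∉ vis := fun h => hca ((PySem.Set.contains_iff vis a).2 h)
                simpa using ha
            have hmul : (pvLmaxA faces * pvVmaxA v2f + 1) * (pvUnvis v2f v (PySem.Set.add vis f) + 1)
                ≤ (pvLmaxA faces * pvVmaxA v2f + 1) * pvUnvis v2f v vis :=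
              Nat.mul_le_mul_left _ hu'
            rw [Nat.mul_add, Nat.mul_one] at hmul
            rw [List.length_append]
            generalize hA : (pvLmaxA faces * pvVmaxA v2f + 1) *
              pvUnvis v2f v (PySem.Set.add vis f) = A at hmul ⊢
            generalize hB : (pvLmaxA faces * pvVmaxA v2f + 1) * pvUnvis v2f v vis = B at hmul hfuel
            simp only [List.length_cons] at hfuel
            omega
          have hstep : pvDfsA faces v2f v (n+1) (f :: rest) vis
              = pvDfsA faces v2f v n
                  (pvNbrsA faces v2f v (PySem.Set.add vis f) f ++ rest)
                  (PySem.Set.add vis f) := rfl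
          rw [hstep, ih _ _ hPos'' hW'' hsub'' hfuel'' x]
          constructor
          · rintro (hxv | ⟨t, ht, hr⟩)
            · rcases (hmemvis' x).1 hxv with h | rfl
              · exact Or.inl h
              · exact Or.inr ⟨x, List.mem_cons_self, Relation.ReflTransGen.refl⟩
            · rcases List.mem_append.1 ht with hp | hrest
              · exact Or.inr ⟨f, List.mem_cons_self,
                  Relation.ReflTransGen.head ((hmps t).1 hp).1 hr⟩
              · exact Or.inr ⟨t, List.mem_cons_of_mem _ hrest, hr⟩
          · rintro (hxv | ⟨t, ht, hr⟩)
            · exact Or.inl ((hmemvis' x).2 (Or.inl hxv))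
            · rcases List.mem_cons.1 ht with rfl | ht'
              · exact pv_reach_closure faces v2f v _ _ hW'' t x hfvis' hr
              · exact Or.inr ⟨t, List.mem_append_right _ ht', hr⟩

-- ===== B-side =====

def pvNbrB (faces : List (List Int)) (v2f : PySem.Dict Int (PySem.Set Int)) (v : Int)
    (inc : PySem.Set Int) (f : Int) : List Int :=
  (PySem.List.pyGetD faces f []).flatMap
    (fun u => if u ≠ v then PySem.Set.inter (v2f.getD u PySem.Set.empty) inc else [])

lemma pv_gatherB_eq (faces : List (List Int)) (v2f : PySem.Dict Int (PySem.Set Int)) (v : Int)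
    (inc : PySem.Set Int) (comp : PySem.Set Int) :
    pvGatherB faces v2f v inc comp = comp.flatMap (pvNbrB faces v2f v inc) := by
  unfold pvGatherB
  have hin : ∀ (acc : List Int) (f : Int),
      (PySem.List.pyGetD faces f []).foldl
        (fun acc2 u =>
          if u ≠ v then acc2 ++ PySem.Set.inter (v2f.getD u PySem.Set.empty) inc else acc2)
        acc = acc ++ pvNbrB faces v2f v inc f := by
    intro acc f
    rw [show (fun (acc2 : List Int) u =>
          if u ≠ v then acc2 ++ PySem.Set.inter (v2f.getD u PySem.Set.empty) inc else acc2)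
        = (fun (acc2 : List Int) u => acc2 ++
            if u ≠ v then PySem.Set.inter (v2f.getD u PySem.Set.empty) inc else [])
        from funext fun acc2 => funext fun u => by by_cases h : u = v <;> simp [h]]
    rw [PySem.List.foldl_append_eq_flatMap]
    rfl
  rw [show (fun (acc : List Int) f =>
        (PySem.List.pyGetD faces f []).foldl
          (fun acc2 u =>
            if u ≠ v then acc2 ++ PySem.Set.inter (v2f.getD u PySem.Set.empty) inc else acc2)
          acc)
      = (fun (acc : List Int) f => acc ++ pvNbrB faces v2f v inc f)
      from funext fun acc => funext fun f => hin acc f]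
  rw [PySem.List.foldl_append_eq_flatMap]
  rfl

lemma pv_mem_expandB (faces : List (List Int)) (v2f : PySem.Dict Int (PySem.Set Int)) (v : Int)
    (comp : PySem.Set Int) (x : Int) :
    x ∈ pvExpandB faces v2f v (v2f.getD v PySem.Set.empty) comp ↔
      x ∈ comp ∨ ∃ f ∈ comp, pvAdj faces v2f v f x := by
  have hnbr : ∀ f : Int,
      x ∈ pvNbrB faces v2f v (v2f.getD v PySem.Set.empty) f ↔ pvAdj faces v2f v f x := by
    intro f
    unfold pvNbrB pvAdj
    simp only [List.mem_flatMap]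
    constructor
    · rintro ⟨u, hu, hx⟩
      by_cases h : u = v
      · simp [h] at hx
      · simp only [h, ne_eq, not_false_iff, if_true] at hx
        rw [PySem.Set.mem_inter] at hx
        exact ⟨u, hu, h, hx.1, hx.2⟩
    · rintro ⟨u, hu, hne, h1, h2⟩
      refine ⟨u, hu, ?_⟩
      simp only [hne, ne_eq, not_false_iff, if_true]
      rw [PySem.Set.mem_inter]
      exact ⟨h1, h2⟩
  unfold pvExpandB
  rw [PySem.Set.mem_union, pv_gatherB_eq]
  simp only [List.mem_flatMap, hnbr]

lemma pv_update_append {α : Type} [BEq α] (t : List α) (c : PySem.Set α) :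
    ∃ suf, PySem.Set.update c t = c ++ suf := by
  induction t generalizing c with
  | nil => exact ⟨[], by simp [PySem.Set.update]⟩
  | cons a t ih =>
      have hstep : PySem.Set.update c (a :: t) = PySem.Set.update (PySem.Set.add c a) t := rfl
      rcases ih (PySem.Set.add c a) with ⟨suf, hsuf⟩
      by_cases h : PySem.Set.contains c a = true
      · have hadd : PySem.Set.add c a = c := by unfold PySem.Set.add; rw [if_pos h]
        exact ⟨suf, by rw [hstep, hsuf, hadd]⟩
      · have hadd : PySem.Set.add c a = c ++ [a] := by unfold PySem.Set.add; rw [if_neg h]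
        refine ⟨[a] ++ suf, ?_⟩
        rw [hstep, hsuf, hadd, List.append_assoc]

lemma pv_foldl_range_iterate {α : Type} (F : α → α) (n : Nat) (c : α) :
    (List.range n).foldl (fun c _ => F c) c = F^[n] c := by
  induction n with
  | zero => rfl
  | succ n ih =>
      rw [List.range_succ, List.foldl_append, ih, Function.iterate_succ_apply']
      rfl

lemma pv_iterate_fix (faces : List (List Int)) (v2f : PySem.Dict Int (PySem.Set Int)) (v : Int) :
    ∀ (n : Nat) (c : PySem.Set Int), c.Nodup →
      (∀ x ∈ c, x ∈ v2f.getD v PySem.Set.empty) →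
      (v2f.getD v PySem.Set.empty).length ≤ c.length + n →
      pvExpandB faces v2f v (v2f.getD v PySem.Set.empty)
          ((pvExpandB faces v2f v (v2f.getD v PySem.Set.empty))^[n] c) =
        (pvExpandB faces v2f v (v2f.getD v PySem.Set.empty))^[n] c := by
  have hpres_nodup : ∀ c : PySem.Set Int, c.Nodup →
      (pvExpandB faces v2f v (v2f.getD v PySem.Set.empty) c).Nodup := by
    intro c hc
    exact PySem.Set.nodup_union _ _ hc
  have hpres_sub : ∀ c : PySem.Set Int, (∀ x ∈ c, x ∈ v2f.getD v PySem.Set.empty) →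
      ∀ x ∈ pvExpandB faces v2f v (v2f.getD v PySem.Set.empty) c,
        x ∈ v2f.getD v PySem.Set.empty := by
    intro c hc x hx
    rcases (pv_mem_expandB faces v2f v c x).1 hx with h | ⟨f, _, _, _, _, _, h2⟩
    · exact hc x h
    · exact h2
  have hprefix : ∀ c : PySem.Set Int,
      ∃ suf, pvExpandB faces v2f v (v2f.getD v PySem.Set.empty) c = c ++ suf := by
    intro c
    exact pv_update_append _ c
  intro n
  induction n with
  | zero =>
      intro c hnd hsub hlen
      simp only [Function.iterate_zero, id_eq] at *
      rcases hprefix c with ⟨suf, hsuf⟩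
      have hle : (pvExpandB faces v2f v (v2f.getD v PySem.Set.empty) c).length ≤
          (v2f.getD v PySem.Set.empty).length :=
        (List.subperm_of_subset (hpres_nodup c hnd)
          (fun x hx => hpres_sub c hsub x hx)).length_le
      have : suf = [] := by
        rw [hsuf, List.length_append] at hle
        cases suf with
        | nil => rfl
        | cons a s => exfalso; simp only [List.length_cons] at hle; omega
      rw [hsuf, this, List.append_nil]
  | succ n ih =>
      intro c hnd hsub hlen
      by_cases hfix : pvExpandB faces v2f v (v2f.getD v PySem.Set.empty) c = c
      · rw [Function.iterate_fixed hfix]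
        exact hfix
      · rcases hprefix c with ⟨suf, hsuf⟩
        have hsufne : suf ≠ [] := by
          intro h
          exact hfix (by rw [hsuf, h, List.append_nil])
        have hlen' : c.length + 1 ≤ (pvExpandB faces v2f v (v2f.getD v PySem.Set.empty) c).length := by
          rw [hsuf, List.length_append]
          cases suf with
          | nil => exact absurd rfl hsufne
          | cons a s => simp
        rw [Function.iterate_succ_apply]
        exact ih (pvExpandB faces v2f v (v2f.getD v PySem.Set.empty) c)
          (hpres_nodup c hnd) (hpres_sub c hsub) (by omega)

lemma pv_compB_mem (faces : List (List Int)) (v2f : PySem.Dict Int (PySem.Set Int)) (v : Int)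
    (s : Int) (hs : s ∈ v2f.getD v PySem.Set.empty) (x : Int) :
    x ∈ (pvExpandB faces v2f v (v2f.getD v PySem.Set.empty))^[(v2f.getD v PySem.Set.empty).length]
          (PySem.Set.add PySem.Set.empty s) ↔
      pvReach faces v2f v s x := by
  have hc0 : PySem.Set.add PySem.Set.empty s = [s] := rfl
  have hsubF : ∀ c : PySem.Set Int, ∀ y ∈ c,
      y ∈ pvExpandB faces v2f v (v2f.getD v PySem.Set.empty) c := by
    intro c y hy
    exact (pv_mem_expandB faces v2f v c y).2 (Or.inl hy)
  -- forward: everything in the iterate is reachable from s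
  have hfwd : ∀ (k : Nat) (c : PySem.Set Int), (∀ y ∈ c, pvReach faces v2f v s y) →
      ∀ y ∈ (pvExpandB faces v2f v (v2f.getD v PySem.Set.empty))^[k] c,
        pvReach faces v2f v s y := by
    intro k
    induction k with
    | zero => intro c hc; simpa using hc
    | succ k ih =>
        intro c hc
        rw [Function.iterate_succ_apply]
        apply ih
        intro y hy
        rcases (pv_mem_expandB faces v2f v c y).1 hy with h | ⟨f, hf, hadj⟩
        · exact hc y h
        · exact Relation.ReflTransGen.tail (hc f hf) hadj
  -- s stays inside
  have hsmem : ∀ (k : Nat),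
      s ∈ (pvExpandB faces v2f v (v2f.getD v PySem.Set.empty))^[k] (PySem.Set.add PySem.Set.empty s) := by
    intro k
    induction k with
    | zero => rw [Function.iterate_zero_apply, hc0]; exact List.mem_singleton.2 rfl
    | succ k ih =>
        rw [Function.iterate_succ_apply']
        exact hsubF _ s ih
  have hfix := pv_iterate_fix faces v2f v (v2f.getD v PySem.Set.empty).length
    (PySem.Set.add PySem.Set.empty s)
    (by rw [hc0]; exact List.nodup_singleton s)
    (by rw [hc0]; intro y hy; rcases List.mem_singleton.1 hy with rfl; exact hs)
    (by rw [hc0]; simp)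
  constructor
  · intro hx
    exact hfwd _ _ (by rw [hc0]; intro y hy; rcases List.mem_singleton.1 hy with rfl; exact .refl) x hx
  · intro hreach
    unfold pvReach at hreach
    induction hreach with
    | refl => exact hsmem _
    | @tail b c hb hadj ih2 =>
        have hbmem := ih2
        have := (pv_mem_expandB faces v2f v _ c).2 (Or.inr ⟨b, hbmem, hadj⟩)
        rw [hfix] at this
        exact this

lemma pv_min_eq_head (s : Int) (t : List Int) (hp : (s :: t).Pairwise (· < ·)) :
    PySem.List.min? (s :: t) (fun x => x) = some s := by
  have hex : ∃ m, PySem.List.min? (s :: t) (fun x => x) = some m := by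
    unfold PySem.List.min?
    simp only [List.foldl_cons]
    induction t generalizing s with
    | nil => exact ⟨s, rfl⟩
    | cons b t ih =>
        simp only [List.foldl_cons]
        by_cases hb : b < s
        · simpa [hb] using ih b (List.pairwise_cons.1 (List.pairwise_cons.1 hp).2 |>.2.cons
            (by intro y hy; exact (List.pairwise_cons.1 (List.pairwise_cons.1 hp).2).1 y hy))
        · simpa [hb] using ih s (by
            rcases List.pairwise_cons.1 hp with ⟨h1, h2⟩
            exact List.Pairwise.cons (fun y hy => h1 y (List.mem_cons_of_mem _ hy))
              (List.pairwise_cons.1 h2).2)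
  rcases hex with ⟨m, hm⟩
  have hmem : m ∈ s :: t := PySem.List.min?_mem hm
  have hmin : ∀ y ∈ s :: t, m ≤ y := by
    have := PySem.List.min?_isMin hm
    simpa using this
  rcases List.mem_cons.1 hmem with rfl | hmt
  · exact hm
  · have h1 : s < m := (List.pairwise_cons.1 hp).1 m hmt
    have h2 : m ≤ s := hmin s (List.mem_cons_self)
    omega

-- ===== bridge =====

lemma pv_check_eq (faces : List (List Int)) (v2f : PySem.Dict Int (PySem.Set Int)) (v : Int)
    (hsorted : ∀ u : Int, (v2f.getD u PySem.Set.empty).Pairwise (· < ·)) :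
    pvCheckA faces v2f v = pvCheckB faces v2f v := by
  unfold pvCheckA pvCheckB
  rcases hinc : v2f.getD v PySem.Set.empty with _ | ⟨s, t⟩
  · simp
  · have hp : (s :: t).Pairwise (· < ·) := by
      have := hsorted v; rw [hinc] at this; exact this
    simp only [List.isEmpty_cons, Bool.false_eq_true, if_false]
    rw [pv_min_eq_head s t hp]
    show (pvDfsA faces v2f v (pvFuelA faces v2f (s :: t)) [s] PySem.Set.empty).equal (s :: t)
      = (List.foldl (fun c _ => pvExpandB faces v2f v (s :: t) c)
          (PySem.Set.empty.add s) (List.range (s :: t).length)).equal (s :: t)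
    rw [pv_foldl_range_iterate]
    have hs : s ∈ v2f.getD v PySem.Set.empty := by
      rw [hinc]; exact List.mem_cons_self
    have hcomp := fun x => pv_compB_mem faces v2f v s hs x
    rw [hinc] at hcomp
    have hPos0 : pvInvPos faces v2f v [s] PySem.Set.empty := by
      intro i hi hm
      exact absurd hm (by simp [PySem.Set.empty])
    have hW0 : pvInvW faces v2f v [s] PySem.Set.empty := by
      intro g hg
      exact absurd hg (by simp [PySem.Set.empty])
    have hsub0 : ∀ tt ∈ [s], tt ∈ v2f.getD v PySem.Set.empty := by
      intro tt htt
      rcases List.mem_singleton.1 htt with rfl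
      exact hs
    have hunvis : pvUnvis v2f v PySem.Set.empty = (s :: t).length := by
      unfold pvUnvis
      rw [hinc]
      simp [PySem.Set.contains, PySem.Set.empty]
    have hfuel0 : ([s] : List Int).length +
        (pvLmaxA faces * pvVmaxA v2f + 1) * pvUnvis v2f v PySem.Set.empty ≤
        pvFuelA faces v2f (s :: t) := by
      rw [hunvis]
      unfold pvFuelA
      generalize (pvLmaxA faces * pvVmaxA v2f + 1) * (s :: t).length = m
      simp only [List.length_cons, List.length_nil]
      omega
    have hdfs := pv_dfsA_mem faces v2f v (pvFuelA faces v2f (s :: t)) [s] PySem.Set.empty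
      hPos0 hW0 hsub0 hfuel0
    have hR : ∀ x, x ∈ pvDfsA faces v2f v (pvFuelA faces v2f (s :: t)) [s] PySem.Set.empty ↔
        pvReach faces v2f v s x := by
      intro x
      rw [hdfs x]
      simp [PySem.Set.empty]
    apply Bool.eq_iff_iff.2
    rw [PySem.Set.equal_iff, PySem.Set.equal_iff]
    constructor
    · intro h x
      exact (hcomp x).trans ((hR x).symm.trans (h x))
    · intro h x
      exact (hR x).trans ((hcomp x).symm.trans (h x))

lemma pv_buildB_sorted (faces : List (List Int)) :
    ∀ u : Int, ((pvV2FB faces).getD u PySem.Set.empty).Pairwise (· < ·) := by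
  have hinner : ∀ (face : List Int) (i : Int) (d : PySem.Dict Int (PySem.Set Int)),
      (∀ u : Int, (d.getD u PySem.Set.empty).Pairwise (· < ·) ∧
        ∀ x ∈ d.getD u PySem.Set.empty, x ≤ i) →
      ∀ u : Int,
        ((face.foldl (fun d u => d.insert u ((d.getD u PySem.Set.empty).add i)) d).getD u
          PySem.Set.empty).Pairwise (· < ·) ∧
        ∀ x ∈ (face.foldl (fun d u => d.insert u ((d.getD u PySem.Set.empty).add i)) d).getD u
          PySem.Set.empty, x ≤ i := by
    intro face
    induction face with
    | nil => intro i d h; exact h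
    | cons a face ih =>
        intro i d h
        simp only [List.foldl_cons]
        apply ih
        intro u
        rw [PySem.Dict.getD_insert]
        by_cases hu : u = a
        · rw [if_pos hu]
          by_cases hc : PySem.Set.contains (d.getD a PySem.Set.empty) i = true
          · have : PySem.Set.add (d.getD a PySem.Set.empty) i = d.getD a PySem.Set.empty := by
              unfold PySem.Set.add; rw [if_pos hc]
            rw [this]; exact h a
          · have : PySem.Set.add (d.getD a PySem.Set.empty) i
                = d.getD a PySem.Set.empty ++ [i] := by
              unfold PySem.Set.add; rw [if_neg hc]
            rw [this]
            have hnotmem : i ∉ d.getD a PySem.Set.empty := by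
              intro hmem
              exact hc ((PySem.Set.contains_iff _ _).2 hmem)
            constructor
            · rw [List.pairwise_append]
              refine ⟨(h a).1, List.pairwise_singleton _ _, ?_⟩
              intro x hx y hy
              rcases List.mem_singleton.1 hy with rfl
              have hle := (h a).2 x hx
              have hne : x ≠ y := fun he => hnotmem (he ▸ hx)
              omega
            · intro x hx
              rcases List.mem_append.1 hx with h1 | h1
              · exact (h a).2 x h1
              · rcases List.mem_singleton.1 h1 with rfl; exact le_refl _
        · rw [if_neg hu]
          exact h u
  have houter : ∀ (fs : List (List Int)) (p : Int × PySem.Dict Int (PySem.Set Int)),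
      (∀ u : Int, (p.2.getD u PySem.Set.empty).Pairwise (· < ·) ∧
        ∀ x ∈ p.2.getD u PySem.Set.empty, x < p.1) →
      ∀ u : Int,
        (((fs.foldl
            (fun (acc : Int × PySem.Dict Int (PySem.Set Int)) face =>
              (acc.1 + 1,
               face.foldl (fun d u => d.insert u ((d.getD u PySem.Set.empty).add acc.1)) acc.2))
            p).2.getD u PySem.Set.empty).Pairwise (· < ·)) := by
    intro fs
    induction fs with
    | nil => intro p h u; exact (h u).1
    | cons face fs ih =>
        intro p h u
        simp only [List.foldl_cons]
        apply ih
        intro w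
        have h1 := hinner face p.1 p.2 (fun w => ⟨(h w).1, fun x hx => le_of_lt ((h w).2 x hx)⟩) w
        exact ⟨h1.1, fun x hx => by have := h1.2 x hx; omega⟩
  intro u
  unfold pvV2FB
  apply houter
  intro w
  constructor
  · simp [PySem.Dict.getD, PySem.Dict.get?, PySem.Dict.empty, PySem.Set.empty]
  · intro x hx
    simp [PySem.Dict.getD, PySem.Dict.get?, PySem.Dict.empty, PySem.Set.empty] at hx

-- ===== VERDICT (by name: the statement is the Claim_ definition above) =====
theorem is_mesh_vertex_manifold_spec : Claim_equal_is_mesh_vertex_manifold := by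
  intro faces vtc _
  have hd : pvV2FB faces = pvV2FA faces := (pvBuild_eq faces).symm
  have hs : ∀ u : Int, ((pvV2FA faces).getD u PySem.Set.empty).Pairwise (· < ·) := by
    rw [pvBuild_eq]; exact pv_buildB_sorted faces
  have hc : (fun u => pvCheckB faces (pvV2FA faces) u)
      = (fun u => pvCheckA faces (pvV2FA faces) u) :=
    funext fun u => (pv_check_eq faces (pvV2FA faces) u hs).symm
  unfold Spec_is_mesh_vertex_manifold
  simp only [is_mesh_vertex_manifold, is_mesh_vertex_manifold_alt, hd, hc]
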